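-- pv_equiv track=rewrite | github.com/AjayKg7/HackerRank | ArrayQueries.py | array_queries
-- ===== SOURCE A (Python) =====
-- def array_queries(N, M, A, B, Q, queries):
--
--     sum_A = sum(A)
--     sum_B = sum(B)
--     sumAI = sum([(i + 1) * v for i, v in enumerate(A)])
--     sumBJ = sum([(j + 1) * val for j, val in enumerate(B)])
--     all_sum = [((sumAI * sum_B) + (sumBJ * sum_A)) % 998244353]
--     for query in queries:
--         i = query[1] - 1
--         j = query[2] - 1
--         if query[0] == 1:
--             sum_A = sum_A - A[i] + B[j]
--             sum_B = sum_B - B[j] + A[i]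
--             sumAI = sumAI - ((i + 1) * A[i]) + ((i + 1) * B[j])
--             sumBJ = sumBJ - ((j + 1) * B[j]) + ((j + 1) * A[i])
--             A[i], B[j] = B[j], A[i]
--
--             all_sum.append(((sumAI * sum_B) + (sumBJ * sum_A)) % 998244353)
--
--         elif query[0] == 2:
--             sumAI = sumAI - ((i + 1) * A[i]) - ((j + 1) * A[j]) + ((i + 1) * A[j]) + ((j + 1) * A[i])
--             A[i], A[j] = A[j], A[i]
--             all_sum.append(((sumAI * sum_B) + (sumBJ * sum_A)) % 998244353)
--
--         elif query[0] == 3: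
--             sumBJ = sumBJ - ((i + 1) * B[i]) - ((j + 1) * B[j]) + ((i + 1) * B[j]) + ((j + 1) * B[i])
--             B[i], B[j] = B[j], B[i]
--             all_sum.append(((sumAI * sum_B) + (sumBJ * sum_A)) % 998244353)
--
--         else:
--             pass
--     return all_sum
-- ===== SOURCE B (Python) =====
-- MOD = 998244353
--
--
-- def array_queries(N, M, A, B, Q, queries):
--     # Mutates A and B in place exactly as the original does.
--     def snapshot():
--         wA = sum((k + 1) * v for k, v in enumerate(A))
--         wB = sum((k + 1) * v for k, v in enumerate(B))
--         return (wA * sum(B) + wB * sum(A)) % MOD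
--
--     out = [snapshot()]
--     for q in queries:
--         t, i, j = q[0], q[1] - 1, q[2] - 1
--         if t == 1:
--             A[i], B[j] = B[j], A[i]
--         elif t == 2:
--             A[i], A[j] = A[j], A[i]
--         elif t == 3:
--             B[i], B[j] = B[j], B[i]
--         else:
--             continue
--         out.append(snapshot())
--     return out
-- ===== Notes on version B (the rewrite author's own statement) =====
-- stated objective: simpler
-- what changed: B drops A's four incrementally-maintained running sums and instead, after performing the same swap, recomputes sum(A), sum(B) and the two weighted sums from scratch for each answered query (repeated-scan strategy).
-- intended difference: On inputs where some type-1/2/3 query carries a non-positive 1-based index (Python negative-index wrap-around), A returns cross-sums computed from incremental updates weighted by the raw (i+1) instead of the wrapped position's weight, while B returns the cross-sum recomputed from the actual arrays after the swap; B's value is the intended one. — e.g. on array_queries(2, 2, [1, 2], [3, 4], 1, [[1, 0, 1]]): A returns [68, 70], B returns [68, 82]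
import Mathlib
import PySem

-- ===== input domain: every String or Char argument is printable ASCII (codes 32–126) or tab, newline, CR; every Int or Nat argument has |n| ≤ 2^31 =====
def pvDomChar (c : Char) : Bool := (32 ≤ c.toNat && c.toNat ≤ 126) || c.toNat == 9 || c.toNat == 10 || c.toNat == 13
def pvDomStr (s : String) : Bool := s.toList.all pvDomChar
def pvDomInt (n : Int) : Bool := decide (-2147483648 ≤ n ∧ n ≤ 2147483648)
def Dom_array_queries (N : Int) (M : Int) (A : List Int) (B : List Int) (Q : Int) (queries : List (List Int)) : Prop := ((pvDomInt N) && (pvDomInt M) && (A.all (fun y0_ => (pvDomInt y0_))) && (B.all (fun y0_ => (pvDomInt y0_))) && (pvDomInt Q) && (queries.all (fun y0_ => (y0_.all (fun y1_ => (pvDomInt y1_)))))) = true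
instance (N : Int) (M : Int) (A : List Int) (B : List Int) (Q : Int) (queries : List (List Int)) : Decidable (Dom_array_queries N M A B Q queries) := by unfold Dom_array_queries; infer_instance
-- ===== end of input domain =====

-- B recomputes all four aggregates from the current arrays after each swap instead of
-- maintaining them incrementally; simpler code, and correct where A's (i+1)-weighted
-- incremental updates go wrong on wrapped negative indices (see D_ below).
-- Both the Python A and the Python B mutate A and B in place; the equivalence proved
-- here is about the RETURN value only.

-- ===== PORT A =====
-- sum([(i + 1) * v for i, v in enumerate(xs)]) starting the weight at k
def pvWsum (k : Int) : List Int → Int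
  | [] => 0
  | v :: rest => k * v + pvWsum (k + 1) rest

-- the body of A's `for query in queries` loop; state = (A, B, sum_A, sum_B, sumAI, sumBJ, all_sum)
def pvStepA (st : List Int × List Int × Int × Int × Int × Int × List Int) (query : List Int) :
    List Int × List Int × Int × Int × Int × Int × List Int :=
  let (Al, Bl, sA, sB, sAI, sBJ, allSum) := st
  let i := PySem.List.pyGetD query 1 0 - 1
  let j := PySem.List.pyGetD query 2 0 - 1
  if PySem.List.pyGetD query 0 0 = 1 then
    let ai := PySem.List.pyGetD Al i 0
    let bj := PySem.List.pyGetD Bl j 0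
    let sA' := sA - ai + bj
    let sB' := sB - bj + ai
    let sAI' := sAI - ((i + 1) * ai) + ((i + 1) * bj)
    let sBJ' := sBJ - ((j + 1) * bj) + ((j + 1) * ai)
    let Al' := PySem.List.pySetD Al i bj
    let Bl' := PySem.List.pySetD Bl j ai
    (Al', Bl', sA', sB', sAI', sBJ', allSum ++ [PySem.Int.mod (sAI' * sB' + sBJ' * sA') 998244353])
  else if PySem.List.pyGetD query 0 0 = 2 then
    let ai := PySem.List.pyGetD Al i 0
    let aj := PySem.List.pyGetD Al j 0
    let sAI' := sAI - ((i + 1) * ai) - ((j + 1) * aj) + ((i + 1) * aj) + ((j + 1) * ai)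
    let Al' := PySem.List.pySetD (PySem.List.pySetD Al i aj) j ai
    (Al', Bl, sA, sB, sAI', sBJ, allSum ++ [PySem.Int.mod (sAI' * sB + sBJ * sA) 998244353])
  else if PySem.List.pyGetD query 0 0 = 3 then
    let bi := PySem.List.pyGetD Bl i 0
    let bj := PySem.List.pyGetD Bl j 0
    let sBJ' := sBJ - ((i + 1) * bi) - ((j + 1) * bj) + ((i + 1) * bj) + ((j + 1) * bi)
    let Bl' := PySem.List.pySetD (PySem.List.pySetD Bl i bj) j bi
    (Al, Bl', sA, sB, sAI, sBJ', allSum ++ [PySem.Int.mod (sAI * sB + sBJ' * sA) 998244353])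
  else
    (Al, Bl, sA, sB, sAI, sBJ, allSum)

def array_queries (N : Int) (M : Int) (A : List Int) (B : List Int) (Q : Int) (queries : List (List Int)) : List Int :=
  let sumA := A.sum
  let sumB := B.sum
  let sumAI := pvWsum 1 A
  let sumBJ := pvWsum 1 B
  let allSum := [PySem.Int.mod (sumAI * sumB + sumBJ * sumA) 998244353]
  (queries.foldl pvStepA (A, B, sumA, sumB, sumAI, sumBJ, allSum)).2.2.2.2.2.2

-- ===== PORT B =====
-- B's snapshot(): recompute all four aggregates from the current arrays
def pvSnapshot (Al Bl : List Int) : Int :=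
  PySem.Int.mod (pvWsum 1 Al * Bl.sum + pvWsum 1 Bl * Al.sum) 998244353

-- the body of B's loop; state = (A, B, out)
def pvStepB (st : List Int × List Int × List Int) (q : List Int) :
    List Int × List Int × List Int :=
  let (Al, Bl, out) := st
  let t := PySem.List.pyGetD q 0 0
  let i := PySem.List.pyGetD q 1 0 - 1
  let j := PySem.List.pyGetD q 2 0 - 1
  if t = 1 then
    let Al' := PySem.List.pySetD Al i (PySem.List.pyGetD Bl j 0)
    let Bl' := PySem.List.pySetD Bl j (PySem.List.pyGetD Al i 0)
    (Al', Bl', out ++ [pvSnapshot Al' Bl'])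
  else if t = 2 then
    let Al' := PySem.List.pySetD (PySem.List.pySetD Al i (PySem.List.pyGetD Al j 0)) j (PySem.List.pyGetD Al i 0)
    (Al', Bl, out ++ [pvSnapshot Al' Bl])
  else if t = 3 then
    let Bl' := PySem.List.pySetD (PySem.List.pySetD Bl i (PySem.List.pyGetD Bl j 0)) j (PySem.List.pyGetD Bl i 0)
    (Al, Bl', out ++ [pvSnapshot Al Bl'])
  else
    (Al, Bl, out)

def array_queries_alt (N : Int) (M : Int) (A : List Int) (B : List Int) (Q : Int) (queries : List (List Int)) : List Int :=
  (queries.foldl pvStepB (A, B, [pvSnapshot A B])).2.2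

-- ===== PRECONDITION & SPEC =====
-- Pre_ excludes exactly the inputs on which A raises: a query shorter than 3 entries
-- (IndexError on query[1]/query[2]) or a type-1/2/3 query whose 1-based indices fall
-- outside Python's wrap-around range (IndexError on the list access).
def Pre_array_queries (N : Int) (M : Int) (A : List Int) (B : List Int) (Q : Int) (queries : List (List Int)) : Prop :=
  ∀ q ∈ queries, 3 ≤ q.length ∧
    (PySem.List.pyGetD q 0 0 = 1 →
      PySem.Raise.InRange A.length (PySem.List.pyGetD q 1 0 - 1) ∧
      PySem.Raise.InRange B.length (PySem.List.pyGetD q 2 0 - 1)) ∧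
    (PySem.List.pyGetD q 0 0 = 2 →
      PySem.Raise.InRange A.length (PySem.List.pyGetD q 1 0 - 1) ∧
      PySem.Raise.InRange A.length (PySem.List.pyGetD q 2 0 - 1)) ∧
    (PySem.List.pyGetD q 0 0 = 3 →
      PySem.Raise.InRange B.length (PySem.List.pyGetD q 1 0 - 1) ∧
      PySem.Raise.InRange B.length (PySem.List.pyGetD q 2 0 - 1))

instance (N : Int) (M : Int) (A : List Int) (B : List Int) (Q : Int) (queries : List (List Int)) : Decidable (Pre_array_queries N M A B Q queries) := by unfold Pre_array_queries; infer_instance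

def pvWitness_array_queries : Int × Int × List Int × List Int × Int × List (List Int) :=
  (2, 2, [1, 2], [3, 4], 2, [[1, 1, 1], [2, 1, 2]])

-- On inputs where some type-1/2/3 query uses a non-positive 1-based index (Python
-- wrap-around), A returns values computed from incremental sums weighted by the raw
-- (i+1) instead of the wrapped position's weight, while B recomputes the aggregates
-- from the actual arrays; B's value is the intended cross-sum of the current arrays.
def D_array_queries (N : Int) (M : Int) (A : List Int) (B : List Int) (Q : Int) (queries : List (List Int)) : Prop :=
  ∃ q ∈ queries, 3 ≤ q.length ∧
    (PySem.List.pyGetD q 0 0 = 1 ∨ PySem.List.pyGetD q 0 0 = 2 ∨ PySem.List.pyGetD q 0 0 = 3) ∧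
    (PySem.List.pyGetD q 1 0 ≤ 0 ∨ PySem.List.pyGetD q 2 0 ≤ 0)

instance (N : Int) (M : Int) (A : List Int) (B : List Int) (Q : Int) (queries : List (List Int)) : Decidable (D_array_queries N M A B Q queries) := by unfold D_array_queries; infer_instance

def Spec_array_queries (N : Int) (M : Int) (A : List Int) (B : List Int) (Q : Int) (queries : List (List Int)) (out : List Int) : Prop := ¬ D_array_queries N M A B Q queries → out = array_queries_alt N M A B Q queries
instance (N : Int) (M : Int) (A : List Int) (B : List Int) (Q : Int) (queries : List (List Int)) (out : List Int) : Decidable (Spec_array_queries N M A B Q queries out) := by unfold Spec_array_queries; infer_instance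

def pvDiffWitness_array_queries : Int × Int × List Int × List Int × Int × List (List Int) :=
  (2, 2, [1, 2], [3, 4], 1, [[1, 0, 1]])
def pvDiffWitnessOut_array_queries : (List Int) × (List Int) := ([68, 70], [68, 82])

-- ===== CLAIM (what is proved, stated in full; the proofs are below) =====
def Claim_unchanged_array_queries : Prop := ∀ (N : Int) (M : Int) (A : List Int) (B : List Int) (Q : Int) (queries : List (List Int)), Dom_array_queries N M A B Q queries → Pre_array_queries N M A B Q queries → Spec_array_queries N M A B Q queries (array_queries N M A B Q queries)
def Claim_changed_array_queries : Prop := Dom_array_queries (pvDiffWitness_array_queries.1) (pvDiffWitness_array_queries.2.1) (pvDiffWitness_array_queries.2.2.1) (pvDiffWitness_array_queries.2.2.2.1) (pvDiffWitness_array_queries.2.2.2.2.1) (pvDiffWitness_array_queries.2.2.2.2.2) ∧ Pre_array_queries (pvDiffWitness_array_queries.1) (pvDiffWitness_array_queries.2.1) (pvDiffWitness_array_queries.2.2.1) (pvDiffWitness_array_queries.2.2.2.1) (pvDiffWitness_array_queries.2.2.2.2.1) (pvDiffWitness_array_queries.2.2.2.2.2) ∧ D_array_queries (pvDiffWitness_array_queries.1)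 (pvDiffWitness_array_queries.2.1) (pvDiffWitness_array_queries.2.2.1) (pvDiffWitness_array_queries.2.2.2.1) (pvDiffWitness_array_queries.2.2.2.2.1) (pvDiffWitness_array_queries.2.2.2.2.2) ∧ array_queries (pvDiffWitness_array_queries.1) (pvDiffWitness_array_queries.2.1) (pvDiffWitness_array_queries.2.2.1) (pvDiffWitness_array_queries.2.2.2.1) (pvDiffWitness_array_queries.2.2.2.2.1) (pvDiffWitness_array_queries.2.2.2.2.2) = pvDiffWitnessOut_array_queries.1 ∧ array_queries_alt (pvDiffWitness_array_queries.1) (pvDiffWitness_array_queries.2.1) (pvDiffWitness_array_queries.2.2.1) (pvDiffWitness_array_queries.2.2.2.1) (pvDiffWitness_array_queries.2.2.2.2.1) (pvDiffWitness_array_queries.2.2.2.2.2) = pvDiffWitnessOut_array_queries.2 ∧ pvDiffWitnessOut_array_queries.1 ≠ pvDiffWitnessOut_array_queries.2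

-- ===== LEMMAS AND PROOFS =====

theorem pv_sum_set (xs : List Int) (n : Nat) (v : Int) (h : n < xs.length) :
    (xs.set n v).sum = xs.sum - xs[n] + v := by
  induction xs generalizing n with
  | nil => simp at h
  | cons x rest ih =>
    cases n with
    | zero => simp [List.set]; ring
    | succ m =>
      simp only [List.set, List.sum_cons, List.getElem_cons_succ]
      rw [ih m (by simpa using h)]; ring

theorem pv_wsum_set (xs : List Int) (k : Int) (n : Nat) (v : Int) (h : n < xs.length) :
    pvWsum k (xs.set n v) = pvWsum k xs + (k + n) * (v - xs[n]) := by
  induction xs generalizing k n with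
  | nil => simp at h
  | cons x rest ih =>
    cases n with
    | zero => simp [List.set, pvWsum]; ring
    | succ m =>
      simp only [List.set, pvWsum, List.getElem_cons_succ]
      rw [ih (k + 1) m (by simpa using h)]
      push_cast; ring

theorem pv_sum_pySetD (xs : List Int) (i v : Int) (h0 : 0 ≤ i) (h1 : i < (xs.length : Int)) :
    (PySem.List.pySetD xs i v).sum = xs.sum - PySem.List.pyGetD xs i 0 + v := by
  rw [PySem.List.pySetD_of_nonneg xs v h0, PySem.List.pyGetD_eq_getElem xs 0 h0 h1,
    pv_sum_set xs i.toNat v (by omega)]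

theorem pv_wsum_pySetD (xs : List Int) (i v : Int) (h0 : 0 ≤ i) (h1 : i < (xs.length : Int)) :
    pvWsum 1 (PySem.List.pySetD xs i v) = pvWsum 1 xs + (i + 1) * (v - PySem.List.pyGetD xs i 0) := by
  rw [PySem.List.pySetD_of_nonneg xs v h0, PySem.List.pyGetD_eq_getElem xs 0 h0 h1,
    pv_wsum_set xs 1 i.toNat v (by omega)]
  have : ((i.toNat : Nat) : Int) = i := Int.toNat_of_nonneg h0
  rw [this]; ring

theorem pv_len_pySetD (xs : List Int) (i v : Int) :
    (PySem.List.pySetD xs i v).length = xs.length := by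
  simp [PySem.List.length_pySetD]

theorem pv_get_pySetD (xs : List Int) (i j v : Int) (h0i : 0 ≤ i) (h1i : i < (xs.length : Int))
    (h0j : 0 ≤ j) (h1j : j < (xs.length : Int)) :
    PySem.List.pyGetD (PySem.List.pySetD xs i v) j 0 =
      if j = i then v else PySem.List.pyGetD xs j 0 := by
  rw [PySem.List.pySetD_of_nonneg xs v h0i,
    PySem.List.pyGetD_eq_getElem _ 0 h0j (by rw [List.length_set]; exact h1j),
    PySem.List.pyGetD_eq_getElem xs 0 h0j h1j]
  rw [List.getElem_set]
  by_cases h : j = i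
  · simp [h]
  · have : i.toNat ≠ j.toNat := by omega
    simp [this, h]

theorem pv_sum_swap (xs : List Int) (i j : Int) (h0i : 0 ≤ i) (h1i : i < (xs.length : Int))
    (h0j : 0 ≤ j) (h1j : j < (xs.length : Int)) :
    (PySem.List.pySetD (PySem.List.pySetD xs i (PySem.List.pyGetD xs j 0)) j
      (PySem.List.pyGetD xs i 0)).sum = xs.sum := by
  rw [pv_sum_pySetD _ j _ h0j (by rw [pv_len_pySetD]; exact h1j),
    pv_sum_pySetD xs i _ h0i h1i, pv_get_pySetD xs i j _ h0i h1i h0j h1j]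
  by_cases h : j = i
  · simp [h]; try ring
  · simp [h]; try ring

theorem pv_wsum_swap (xs : List Int) (i j : Int) (h0i : 0 ≤ i) (h1i : i < (xs.length : Int))
    (h0j : 0 ≤ j) (h1j : j < (xs.length : Int)) :
    pvWsum 1 (PySem.List.pySetD (PySem.List.pySetD xs i (PySem.List.pyGetD xs j 0)) j
      (PySem.List.pyGetD xs i 0)) =
      pvWsum 1 xs - (i + 1) * PySem.List.pyGetD xs i 0 - (j + 1) * PySem.List.pyGetD xs j 0
        + (i + 1) * PySem.List.pyGetD xs j 0 + (j + 1) * PySem.List.pyGetD xs i 0 := by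
  rw [pv_wsum_pySetD _ j _ h0j (by rw [pv_len_pySetD]; exact h1j),
    pv_wsum_pySetD xs i _ h0i h1i, pv_get_pySetD xs i j _ h0i h1i h0j h1j]
  by_cases h : j = i
  · simp [h]; try ring
  · simp [h]; try ring


def pvGood (lenA lenB : Nat) (q : List Int) : Prop :=
  (PySem.List.pyGetD q 0 0 = 1 →
    1 ≤ PySem.List.pyGetD q 1 0 ∧ PySem.List.pyGetD q 1 0 ≤ lenA ∧
    1 ≤ PySem.List.pyGetD q 2 0 ∧ PySem.List.pyGetD q 2 0 ≤ lenB) ∧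
  (PySem.List.pyGetD q 0 0 = 2 →
    1 ≤ PySem.List.pyGetD q 1 0 ∧ PySem.List.pyGetD q 1 0 ≤ lenA ∧
    1 ≤ PySem.List.pyGetD q 2 0 ∧ PySem.List.pyGetD q 2 0 ≤ lenA) ∧
  (PySem.List.pyGetD q 0 0 = 3 →
    1 ≤ PySem.List.pyGetD q 1 0 ∧ PySem.List.pyGetD q 1 0 ≤ lenB ∧
    1 ≤ PySem.List.pyGetD q 2 0 ∧ PySem.List.pyGetD q 2 0 ≤ lenB)


theorem pv_step_eq (Al Bl : List Int) (acc : List Int) (q : List Int)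
    (hq : pvGood Al.length Bl.length q) :
    pvStepA (Al, Bl, Al.sum, Bl.sum, pvWsum 1 Al, pvWsum 1 Bl, acc) q =
      ((pvStepB (Al, Bl, acc) q).1, (pvStepB (Al, Bl, acc) q).2.1,
       (pvStepB (Al, Bl, acc) q).1.sum, (pvStepB (Al, Bl, acc) q).2.1.sum,
       pvWsum 1 (pvStepB (Al, Bl, acc) q).1, pvWsum 1 (pvStepB (Al, Bl, acc) q).2.1,
       (pvStepB (Al, Bl, acc) q).2.2) := by
  obtain ⟨g1, g2, g3⟩ := hq
  by_cases ht1 : PySem.List.pyGetD q 0 0 = 1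
  · obtain ⟨ha1, ha2, hb1, hb2⟩ := g1 ht1
    have h0i : (0:Int) ≤ PySem.List.pyGetD q 1 0 - 1 := by omega
    have h1i : PySem.List.pyGetD q 1 0 - 1 < (Al.length : Int) := by omega
    have h0j : (0:Int) ≤ PySem.List.pyGetD q 2 0 - 1 := by omega
    have h1j : PySem.List.pyGetD q 2 0 - 1 < (Bl.length : Int) := by omega
    have e1 := pv_sum_pySetD Al (PySem.List.pyGetD q 1 0 - 1) (PySem.List.pyGetD Bl (PySem.List.pyGetD q 2 0 - 1) 0) h0i h1i
    have e2 := pv_sum_pySetD Bl (PySem.List.pyGetD q 2 0 - 1) (PySem.List.pyGetD Al (PySem.List.pyGetD q 1 0 - 1) 0) h0j h1j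
    have e3 := pv_wsum_pySetD Al (PySem.List.pyGetD q 1 0 - 1) (PySem.List.pyGetD Bl (PySem.List.pyGetD q 2 0 - 1) 0) h0i h1i
    have e4 := pv_wsum_pySetD Bl (PySem.List.pyGetD q 2 0 - 1) (PySem.List.pyGetD Al (PySem.List.pyGetD q 1 0 - 1) 0) h0j h1j
    simp [pvStepA, pvStepB, pvSnapshot, ht1, e1, e2, e3, e4]
    refine ⟨by ring, by ring, ?_⟩
    congr 1
    ring
  · by_cases ht2 : PySem.List.pyGetD q 0 0 = 2
    · obtain ⟨ha1, ha2, hb1, hb2⟩ := g2 ht2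
      have h0i : (0:Int) ≤ PySem.List.pyGetD q 1 0 - 1 := by omega
      have h1i : PySem.List.pyGetD q 1 0 - 1 < (Al.length : Int) := by omega
      have h0j : (0:Int) ≤ PySem.List.pyGetD q 2 0 - 1 := by omega
      have h1j : PySem.List.pyGetD q 2 0 - 1 < (Al.length : Int) := by omega
      have e1 := pv_sum_swap Al (PySem.List.pyGetD q 1 0 - 1) (PySem.List.pyGetD q 2 0 - 1) h0i h1i h0j h1j
      have e2 := pv_wsum_swap Al (PySem.List.pyGetD q 1 0 - 1) (PySem.List.pyGetD q 2 0 - 1) h0i h1i h0j h1j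
      simp [pvStepA, pvStepB, pvSnapshot, ht2, e1, e2]
    · by_cases ht3 : PySem.List.pyGetD q 0 0 = 3
      · obtain ⟨ha1, ha2, hb1, hb2⟩ := g3 ht3
        have h0i : (0:Int) ≤ PySem.List.pyGetD q 1 0 - 1 := by omega
        have h1i : PySem.List.pyGetD q 1 0 - 1 < (Bl.length : Int) := by omega
        have h0j : (0:Int) ≤ PySem.List.pyGetD q 2 0 - 1 := by omega
        have h1j : PySem.List.pyGetD q 2 0 - 1 < (Bl.length : Int) := by omega
        have e1 := pv_sum_swap Bl (PySem.List.pyGetD q 1 0 - 1) (PySem.List.pyGetD q 2 0 - 1) h0i h1i h0j h1j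
        have e2 := pv_wsum_swap Bl (PySem.List.pyGetD q 1 0 - 1) (PySem.List.pyGetD q 2 0 - 1) h0i h1i h0j h1j
        simp [pvStepA, pvStepB, pvSnapshot, ht3, e1, e2]
      · simp [pvStepA, pvStepB, ht1, ht2, ht3]

theorem pv_step_len (Al Bl : List Int) (acc : List Int) (q : List Int) :
    (pvStepB (Al, Bl, acc) q).1.length = Al.length ∧
      (pvStepB (Al, Bl, acc) q).2.1.length = Bl.length := by
  simp only [pvStepB]
  split_ifs <;> simp [pv_len_pySetD]

theorem pv_loop_eq (queries : List (List Int)) (Al Bl : List Int) (acc : List Int)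
    (hq : ∀ q ∈ queries, pvGood Al.length Bl.length q) :
    (queries.foldl pvStepA (Al, Bl, Al.sum, Bl.sum, pvWsum 1 Al, pvWsum 1 Bl, acc)).2.2.2.2.2.2 =
      (queries.foldl pvStepB (Al, Bl, acc)).2.2 := by
  induction queries generalizing Al Bl acc with
  | nil => rfl
  | cons q rest ih =>
    simp only [List.foldl_cons]
    rw [pv_step_eq Al Bl acc q (hq q (by simp))]
    obtain ⟨hA, hB⟩ := pv_step_len Al Bl acc q
    exact ih _ _ _ (fun q' hq' => by rw [hA, hB]; exact hq _ (by simp [hq']))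

-- ===== VERDICT (by name: the statement is the Claim_ definition above) =====
theorem array_queries_spec : Claim_unchanged_array_queries := by
  intro N M A B Q queries _hDom hPre hD'
  unfold array_queries array_queries_alt
  simp only [pvSnapshot]
  refine pv_loop_eq queries A B _ ?_
  intro q hq
  obtain ⟨hlen, h1, h2, h3⟩ := hPre q hq
  have hD : ¬ (3 ≤ q.length ∧
      (PySem.List.pyGetD q 0 0 = 1 ∨ PySem.List.pyGetD q 0 0 = 2 ∨ PySem.List.pyGetD q 0 0 = 3) ∧
      (PySem.List.pyGetD q 1 0 ≤ 0 ∨ PySem.List.pyGetD q 2 0 ≤ 0)) := by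
    intro hcon
    exact hD' ⟨q, hq, hcon⟩
  refine ⟨fun ht => ?_, fun ht => ?_, fun ht => ?_⟩
  · obtain ⟨hi, hj⟩ := h1 ht
    have hnp : ¬ (PySem.List.pyGetD q 1 0 ≤ 0 ∨ PySem.List.pyGetD q 2 0 ≤ 0) :=
      fun hc => hD ⟨hlen, Or.inl ht, hc⟩
    unfold PySem.Raise.InRange at hi hj
    omega
  · obtain ⟨hi, hj⟩ := h2 ht
    have hnp : ¬ (PySem.List.pyGetD q 1 0 ≤ 0 ∨ PySem.List.pyGetD q 2 0 ≤ 0) :=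
      fun hc => hD ⟨hlen, Or.inr (Or.inl ht), hc⟩
    unfold PySem.Raise.InRange at hi hj
    omega
  · obtain ⟨hi, hj⟩ := h3 ht
    have hnp : ¬ (PySem.List.pyGetD q 1 0 ≤ 0 ∨ PySem.List.pyGetD q 2 0 ≤ 0) :=
      fun hc => hD ⟨hlen, Or.inr (Or.inr ht), hc⟩
    unfold PySem.Raise.InRange at hi hj
    omega

theorem array_queries_changed : Claim_changed_array_queries := by
  unfold Claim_changed_array_queries; decide
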